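-- pv_equiv track=rewrite | github.com/yanmo2011/demo | sequence_sum/square_sum.py | square_sum_iterative
-- ===== SOURCE A (Python) =====
-- def square_sum_iterative(n):
--     """
--     使用迭代方法计算数列 1² + 2² + 3² + ... + n² 的和
--
--     Args:
--         n (int): 数列的项数，必须是非负整数
--
--     Returns:
--         int: 数列的和
--     """
--     # 参数验证
--     if not isinstance(n, int):
--         raise TypeError("参数n必须是整数")
--
--     if n < 0:
--         raise ValueError("参数n必须是非负整数")
--
--     # 基础情况
--     if n == 0:
--         return 0
--
--     # 使用循环迭代计算
--     result = 0
--     for i in range(1, n + 1):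
--         result += i * i
--
--     return result
-- ===== SOURCE B (Python) =====
-- def square_sum_iterative(n):
--     if not isinstance(n, int):
--         raise TypeError("参数n必须是整数")
--     if n < 0:
--         raise ValueError("参数n必须是非负整数")
--     return n * (n + 1) * (2 * n + 1) // 6
-- ===== Notes on version B (the rewrite author's own statement) =====
-- stated objective: faster
-- what changed: Replaced the O(n) loop summing i*i with the closed-form formula n(n+1)(2n+1)//6.
import Mathlib
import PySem

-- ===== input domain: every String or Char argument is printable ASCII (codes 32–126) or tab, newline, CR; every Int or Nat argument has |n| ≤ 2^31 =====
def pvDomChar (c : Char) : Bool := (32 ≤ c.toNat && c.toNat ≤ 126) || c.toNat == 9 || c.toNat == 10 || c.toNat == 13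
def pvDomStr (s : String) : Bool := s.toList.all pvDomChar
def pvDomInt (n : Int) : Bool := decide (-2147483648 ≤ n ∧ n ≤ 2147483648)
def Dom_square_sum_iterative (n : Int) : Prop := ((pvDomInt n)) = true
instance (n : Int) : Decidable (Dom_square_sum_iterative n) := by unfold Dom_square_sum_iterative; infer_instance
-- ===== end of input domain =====

-- B replaces A's O(n) summation loop with the closed-form formula n(n+1)(2n+1)//6 (faster, asymptotic).


-- ===== PORT A =====
def square_sum_iterative (n : Int) : Int :=
  if n = 0 then 0
  else (PySem.List.pyRange 1 (n + 1) 1).foldl (fun result i => result + i * i) 0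

-- ===== PORT B =====
def square_sum_iterative_alt (n : Int) : Int :=
  PySem.Int.floordiv (n * (n + 1) * (2 * n + 1)) 6

-- ===== PRECONDITION & SPEC =====
-- A raises ValueError for n < 0; Pre_ excludes exactly those inputs.
def Pre_square_sum_iterative (n : Int) : Prop := 0 ≤ n
instance (n : Int) : Decidable (Pre_square_sum_iterative n) := by unfold Pre_square_sum_iterative; infer_instance
def pvWitness_square_sum_iterative : Int := 5

def Spec_square_sum_iterative (n : Int) (out : Int) : Prop := out = square_sum_iterative_alt n
instance (n : Int) (out : Int) : Decidable (Spec_square_sum_iterative n out) := by unfold Spec_square_sum_iterative; infer_instance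

-- ===== CLAIM (what is proved, stated in full; the proofs are below) =====
def Claim_equal_square_sum_iterative : Prop := ∀ (n : Int), Dom_square_sum_iterative n → Pre_square_sum_iterative n → Spec_square_sum_iterative n (square_sum_iterative n)

-- ===== LEMMAS AND PROOFS =====

-- For every Nat m, six times A's loop sum over range(1, m+1) equals m(m+1)(2m+1).
lemma six_mul_loop (m : Nat) :
    6 * ((PySem.List.pyRange 1 ((m : Int) + 1) 1).foldl (fun result i => result + i * i) 0)
      = (m : Int) * ((m : Int) + 1) * (2 * (m : Int) + 1) := by
  induction m with
  | zero => decide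
  | succ k ih =>
      have h : PySem.List.pyRange 1 (((k : Int) + 1) + 1) 1
          = PySem.List.pyRange 1 ((k : Int) + 1) 1 ++ [(k : Int) + 1] :=
        PySem.List.pyRange_one_succ_right (by omega)
      push_cast
      rw [h, List.foldl_append]
      simp only [List.foldl]
      push_cast at ih
      ring_nf
      ring_nf at ih
      linarith [ih]

lemma loop_eq_alt (m : Nat) :
    (PySem.List.pyRange 1 ((m : Int) + 1) 1).foldl (fun result i => result + i * i) 0
      = square_sum_iterative_alt (m : Int) := by
  have h6 := six_mul_loop m
  unfold square_sum_iterative_alt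
  symm
  rw [PySem.Int.floordiv_eq_iff_of_pos (by norm_num)]
  constructor <;> nlinarith [h6]

-- ===== VERDICT (by name: the statement is the Claim_ definition above) =====
theorem square_sum_iterative_spec : Claim_equal_square_sum_iterative := by
  intro n _ hpre
  unfold Spec_square_sum_iterative square_sum_iterative
  obtain ⟨m, rfl⟩ := Int.eq_ofNat_of_zero_le hpre
  by_cases hz : (m : Int) = 0
  · simp [hz, square_sum_iterative_alt]
  · rw [if_neg hz]
    exact loop_eq_alt m
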